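-- pv_equiv track=rewrite | github.com/bryantran24/slitherlink | 2x2shortmax.py | build_vertices
-- ===== SOURCE A (Python) =====
-- def h_name(r, c):
--     return f"h{r}{c}"
--
-- def v_name(r, c):
--     return f"v{r}{c}"
--
-- def build_vertices(H, W):
--     vertices = []
--     incident_vtx = {}
--
--     for r in range(H + 1):
--         for c in range(W + 1):
--             p = f"p{r}{c}"
--             vertices.append(p)
--
--             inc = []
--             if c > 0:
--                 inc.append(h_name(r, c - 1))
--             if c < W:
--                 inc.append(h_name(r, c))
--             if r > 0:
--                 inc.append(v_name(r - 1, c))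
--             if r < H:
--                 inc.append(v_name(r, c))
--
--             incident_vtx[p] = inc
--
--     return vertices, incident_vtx
-- ===== SOURCE B (Python) =====
-- def h_name(r, c):
--     return f"h{r}{c}"
--
-- def v_name(r, c):
--     return f"v{r}{c}"
--
-- def build_vertices(H, W):
--     vertices = []
--     incident = {}
--     for r in range(H + 1):
--         for c in range(W + 1):
--             vertices.append(f"p{r}{c}")
--             incident[(r, c)] = []
--     for r in range(H + 1):
--         for c in range(W):
--             e = h_name(r, c)
--             incident[(r, c)].append(e)
--             incident[(r, c + 1)].append(e)
--     for r in range(H):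
--         for c in range(W + 1):
--             e = v_name(r, c)
--             incident[(r, c)].append(e)
--             incident[(r + 1, c)].append(e)
--     incident_vtx = {}
--     for r in range(H + 1):
--         for c in range(W + 1):
--             incident_vtx[f"p{r}{c}"] = incident[(r, c)]
--     return vertices, incident_vtx
-- ===== Notes on version B (the rewrite author's own statement) =====
-- stated objective: alternative
-- what changed: B inverts the decomposition: instead of computing each vertex's incident edges with per-vertex boundary conditionals in one nested loop, it initialises a coordinate-keyed incidence table, scans all horizontal edges and then all vertical edges once appending each edge name to its two endpoints, and finally assembles the name-keyed dict in the same row-major order.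
import Mathlib
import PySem

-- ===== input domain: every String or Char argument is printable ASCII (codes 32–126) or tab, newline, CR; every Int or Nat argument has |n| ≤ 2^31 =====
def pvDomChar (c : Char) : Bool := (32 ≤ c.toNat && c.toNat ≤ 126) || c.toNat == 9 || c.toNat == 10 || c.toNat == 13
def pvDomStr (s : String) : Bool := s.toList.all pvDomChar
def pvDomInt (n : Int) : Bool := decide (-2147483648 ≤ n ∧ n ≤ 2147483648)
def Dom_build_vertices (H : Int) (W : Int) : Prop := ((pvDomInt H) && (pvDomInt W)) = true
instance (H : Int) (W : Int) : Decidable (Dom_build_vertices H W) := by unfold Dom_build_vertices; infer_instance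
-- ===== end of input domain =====

-- B inverts A's decomposition: a coordinate-keyed incidence table filled by one scan over all
-- horizontal edges then all vertical edges (each appended to its two endpoints), assembled into the
-- name-keyed dict at the end, instead of A's per-vertex boundary conditionals; objective: alternative.

-- ===== PORT A =====
def h_name (r : Int) (c : Int) : String := "h" ++ PySem.Int.toStr r ++ PySem.Int.toStr c

def v_name (r : Int) (c : Int) : String := "v" ++ PySem.Int.toStr r ++ PySem.Int.toStr c

def build_vertices (H : Int) (W : Int) : List String × (List (String × List String)) :=
  let st :=
    (PySem.List.pyRange 0 (H + 1)).foldl (fun st r =>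
      (PySem.List.pyRange 0 (W + 1)).foldl
        (fun (st : List String × PySem.Dict String (List String)) c =>
          let p := "p" ++ PySem.Int.toStr r ++ PySem.Int.toStr c
          let vertices := st.1 ++ [p]
          let inc :=
            (if 0 < c then [h_name r (c - 1)] else []) ++
            (if c < W then [h_name r c] else []) ++
            (if 0 < r then [v_name (r - 1) c] else []) ++
            (if r < H then [v_name r c] else [])
          (vertices, st.2.insert p inc)) st)
      (([] : List String), (PySem.Dict.empty : PySem.Dict String (List String)))
  (st.1, st.2.items)

-- ===== PORT B =====
def pname (r : Int) (c : Int) : String := "p" ++ PySem.Int.toStr r ++ PySem.Int.toStr c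

def build_vertices_alt (H : Int) (W : Int) : List String × (List (String × List String)) :=
  let st :=
    (PySem.List.pyRange 0 (H + 1)).foldl (fun st r =>
      (PySem.List.pyRange 0 (W + 1)).foldl
        (fun (st : List String × PySem.Dict (Int × Int) (List String)) c =>
          (st.1 ++ [pname r c], st.2.insert (r, c) [])) st)
      (([] : List String), (PySem.Dict.empty : PySem.Dict (Int × Int) (List String)))
  let incident1 :=
    (PySem.List.pyRange 0 (H + 1)).foldl (fun d r =>
      (PySem.List.pyRange 0 W).foldl (fun d c =>
        let e := h_name r c
        (d.modify (r, c) [] (fun x => x ++ [e])).modify (r, c + 1) [] (fun x => x ++ [e])) d) st.2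
  let incident2 :=
    (PySem.List.pyRange 0 H).foldl (fun d r =>
      (PySem.List.pyRange 0 (W + 1)).foldl (fun d c =>
        let e := v_name r c
        (d.modify (r, c) [] (fun x => x ++ [e])).modify (r + 1, c) [] (fun x => x ++ [e])) d) incident1
  let out :=
    (PySem.List.pyRange 0 (H + 1)).foldl (fun (d : PySem.Dict String (List String)) r =>
      (PySem.List.pyRange 0 (W + 1)).foldl (fun d c =>
        d.insert (pname r c) (incident2.getD (r, c) [])) d) PySem.Dict.empty
  (st.1, out.items)

-- ===== PRECONDITION & SPEC =====
def Spec_build_vertices (H : Int) (W : Int) (out : List String × (List (String × List String))) : Prop :=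
  out = build_vertices_alt H W
instance (H : Int) (W : Int) (out : List String × (List (String × List String))) :
    Decidable (Spec_build_vertices H W out) := by unfold Spec_build_vertices; infer_instance

-- ===== CLAIM (what is proved, stated in full; the proofs are below) =====
def Claim_equal_build_vertices : Prop := ∀ (H : Int) (W : Int), Dom_build_vertices H W →
  Spec_build_vertices H W (build_vertices H W)

-- ===== LEMMAS AND PROOFS =====

/- ## The index set -/

def Pairs (H W : Int) : List (Int × Int) :=
  (PySem.List.pyRange 0 (H + 1)).flatMap (fun r =>
    (PySem.List.pyRange 0 (W + 1)).map (fun c => (r, c)))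

lemma mem_Pairs {H W : Int} {rc : Int × Int} :
    rc ∈ Pairs H W ↔ 0 ≤ rc.1 ∧ rc.1 ≤ H ∧ 0 ≤ rc.2 ∧ rc.2 ≤ W := by
  obtain ⟨r, c⟩ := rc
  simp only [Pairs, List.mem_flatMap, List.mem_map, PySem.List.mem_pyRange_one, Prod.mk.injEq]
  constructor
  · rintro ⟨r', hr', c', hc', rfl, rfl⟩; omega
  · rintro ⟨h1, h2, h3, h4⟩; exact ⟨r, by omega, c, by omega, rfl, rfl⟩

/- ## Characterisation of A -/

def incA (H W : Int) (rc : Int × Int) : List String :=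
  (if 0 < rc.2 then [h_name rc.1 (rc.2 - 1)] else []) ++
  (if rc.2 < W then [h_name rc.1 rc.2] else []) ++
  (if 0 < rc.1 then [v_name (rc.1 - 1) rc.2] else []) ++
  (if rc.1 < H then [v_name rc.1 rc.2] else [])

lemma A_eq (H W : Int) :
    build_vertices H W =
      ((Pairs H W).map (fun rc => pname rc.1 rc.2),
       ((Pairs H W).foldl
          (fun d rc => d.insert (pname rc.1 rc.2) (incA H W rc)) PySem.Dict.empty).items) := by
  have hsplit : ∀ (l : List (Int × Int)) (vs : List String)
      (d : PySem.Dict String (List String)),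
      l.foldl (fun st rc => (st.1 ++ [pname rc.1 rc.2], st.2.insert (pname rc.1 rc.2) (incA H W rc)))
        (vs, d) =
      (vs ++ l.map (fun rc => pname rc.1 rc.2),
       l.foldl (fun d rc => d.insert (pname rc.1 rc.2) (incA H W rc)) d) := by
    intro l
    induction l with
    | nil => intro vs d; simp
    | cons a l ih =>
      intro vs d
      simp only [List.foldl_cons, List.map_cons, ih]
      simp
  have hA : build_vertices H W =
      (((Pairs H W).foldl
        (fun st rc => (st.1 ++ [pname rc.1 rc.2], st.2.insert (pname rc.1 rc.2) (incA H W rc)))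
        (([] : List String), (PySem.Dict.empty : PySem.Dict String (List String)))).1,
       ((Pairs H W).foldl
        (fun st rc => (st.1 ++ [pname rc.1 rc.2], st.2.insert (pname rc.1 rc.2) (incA H W rc)))
        (([] : List String), (PySem.Dict.empty : PySem.Dict String (List String)))).2.items) := by
    simp only [build_vertices, Pairs, List.foldl_flatMap, List.foldl_map]
    rfl
  rw [hA, hsplit]
  simp

/- ## Characterisation of B -/

def hops (H W : Int) : List ((Int × Int) × String) :=
  (PySem.List.pyRange 0 (H + 1)).flatMap (fun r =>
    (PySem.List.pyRange 0 W).flatMap (fun c =>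
      [((r, c), h_name r c), ((r, c + 1), h_name r c)]))

def vops (H W : Int) : List ((Int × Int) × String) :=
  (PySem.List.pyRange 0 H).flatMap (fun r =>
    (PySem.List.pyRange 0 (W + 1)).flatMap (fun c =>
      [((r, c), v_name r c), ((r + 1, c), v_name r c)]))

lemma foldl_edge (lr lc : List Int) (k1 k2 : Int → Int → Int × Int) (e : Int → Int → String)
    (d : PySem.Dict (Int × Int) (List String)) :
    (lr.flatMap (fun r => lc.flatMap (fun c =>
        [(k1 r c, e r c), (k2 r c, e r c)]))).foldl
      (fun d p => d.modify p.1 [] (fun x => x ++ [p.2])) d =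
      lr.foldl (fun d r => lc.foldl (fun d c =>
        ((d.modify (k1 r c) [] (fun x => x ++ [e r c])).modify (k2 r c) []
          (fun x => x ++ [e r c]))) d) d := by
  simp only [List.foldl_flatMap, List.foldl_cons, List.foldl_nil]

lemma B_eq (H W : Int) :
    build_vertices_alt H W =
      ((Pairs H W).map (fun rc => pname rc.1 rc.2),
       ((Pairs H W).foldl
          (fun d rc => d.insert (pname rc.1 rc.2)
            (((hops H W ++ vops H W).foldl
                (fun d p => d.modify p.1 [] (fun x => x ++ [p.2]))
                ((Pairs H W).foldl (fun d rc => d.insert rc ([] : List String))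
                  PySem.Dict.empty)).getD rc []))
          PySem.Dict.empty).items) := by
  have hsplit : ∀ (l : List (Int × Int)) (vs : List String)
      (d : PySem.Dict (Int × Int) (List String)),
      l.foldl (fun st rc => (st.1 ++ [pname rc.1 rc.2], st.2.insert rc [])) (vs, d) =
      (vs ++ l.map (fun rc => pname rc.1 rc.2),
       l.foldl (fun d rc => d.insert rc []) d) := by
    intro l
    induction l with
    | nil => intro vs d; simp
    | cons a l ih =>
      intro vs d
      simp only [List.foldl_cons, List.map_cons, ih]
      simp
  have hB : build_vertices_alt H W =
      (((Pairs H W).foldl (fun st rc => (st.1 ++ [pname rc.1 rc.2], st.2.insert rc []))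
          (([] : List String), (PySem.Dict.empty : PySem.Dict (Int × Int) (List String)))).1,
       ((Pairs H W).foldl
          (fun d rc => d.insert (pname rc.1 rc.2)
            (((hops H W ++ vops H W).foldl
                (fun d p => d.modify p.1 [] (fun x => x ++ [p.2]))
                (((Pairs H W).foldl (fun st rc => (st.1 ++ [pname rc.1 rc.2], st.2.insert rc []))
                  (([] : List String),
                   (PySem.Dict.empty : PySem.Dict (Int × Int) (List String)))).2)).getD rc []))
          PySem.Dict.empty).items) := by
    simp only [build_vertices_alt, hops, vops, List.foldl_append, foldl_edge]
    simp only [Pairs, List.foldl_flatMap, List.foldl_map]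
  rw [hB, hsplit]
  simp

/- ## Filter computations -/

lemma flatMap_congr_mem {α β : Type} (l : List α) (f g : α → List β)
    (h : ∀ a ∈ l, f a = g a) : l.flatMap f = l.flatMap g := by
  induction l with
  | nil => rfl
  | cons a l ih =>
    rw [List.flatMap_cons, List.flatMap_cons, h a (by simp),
        ih (fun a ha => h a (List.mem_cons_of_mem _ ha))]

lemma flatMap_ite {α : Type} (l : List Int) (hpw : l.Pairwise (· < ·)) (x : Int) (g : Int → List α) :
    (l.flatMap fun i => if i = x then g i else []) = if x ∈ l then g x else [] := by
  induction l with
  | nil => simp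
  | cons a l ih =>
    have ha : ∀ b ∈ l, a < b := fun b hb => List.rel_of_pairwise_cons hpw hb
    have ihl := ih (List.Pairwise.sublist (List.sublist_cons_self a l) hpw)
    rw [List.flatMap_cons]
    by_cases hax : a = x
    · subst hax
      have hnot : a ∉ l := fun h => absurd (ha a h) (lt_irrefl a)
      have hz : (l.flatMap fun i => if i = a then g i else []) = [] := by
        rw [List.flatMap_eq_nil_iff]
        intro y hy
        refine if_neg (fun hya => hnot ?_)
        rw [← hya]; exact hy
      rw [if_pos rfl, hz, if_pos (List.mem_cons_self)]
      simp
    · rw [if_neg hax, ihl, List.nil_append]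
      by_cases hxl : x ∈ l
      · rw [if_pos hxl, if_pos (List.mem_cons_of_mem a hxl)]
      · rw [if_neg hxl, if_neg (by simp [hxl]; intro h; exact hax h.symm)]

lemma flatMap_pair {α : Type} (l : List Int) (hpw : l.Pairwise (· < ·)) (x1 x2 : Int)
    (h12 : x1 < x2) (u1 u2 : α) :
    (l.flatMap fun i => (if i = x2 then [u2] else []) ++ (if i = x1 then [u1] else [])) =
      (if x1 ∈ l then [u1] else []) ++ (if x2 ∈ l then [u2] else []) := by
  induction l with
  | nil => simp
  | cons a l ih =>
    have ha : ∀ b ∈ l, a < b := fun b hb => List.rel_of_pairwise_cons hpw hb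
    have ihl := ih (List.Pairwise.sublist (List.sublist_cons_self a l) hpw)
    rw [List.flatMap_cons, ihl]
    by_cases h1 : a = x1
    · subst h1
      have hx1 : a ∉ l := fun h => absurd (ha a h) (lt_irrefl a)
      have hx2a : a ≠ x2 := by omega
      have m2 : (x2 ∈ a :: l) ↔ (x2 ∈ l) := by
        rw [List.mem_cons]
        exact or_iff_right (fun h => hx2a h.symm)
      simp only [m2]
      simp [hx2a, hx1]
    · by_cases h2 : a = x2
      · subst h2
        have hx2 : a ∉ l := fun h => absurd (ha a h) (lt_irrefl a)
        have hx1 : x1 ∉ l := fun h => by have := ha x1 h; omega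
        have hax1 : a ≠ x1 := by omega
        have hx1a : x1 ≠ a := by omega
        simp [hx1, hx2, hax1, hx1a, List.mem_cons]
      · rw [if_neg h2, if_neg h1]
        have m1 : (x1 ∈ a :: l) ↔ (x1 ∈ l) := by
          rw [List.mem_cons]
          exact or_iff_right (fun h => h1 h.symm)
        have m2 : (x2 ∈ a :: l) ↔ (x2 ∈ l) := by
          rw [List.mem_cons]
          exact or_iff_right (fun h => h2 h.symm)
        simp only [m1, m2]
        simp

lemma beq_coord (a b : Int × Int) : (a == b) = decide (a = b) := by
  by_cases h : a = b <;> simp [h]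

lemma filter_hops {H W r c : Int} (hr : 0 ≤ r ∧ r ≤ H) (hc : 0 ≤ c ∧ c ≤ W) :
    (hops H W).filter (fun p => p.1 == (r, c)) =
      (if 0 < c then [((r, c), h_name r (c - 1))] else []) ++
      (if c < W then [((r, c), h_name r c)] else []) := by
  rw [hops, List.filter_flatMap]
  have step1 : ((PySem.List.pyRange 0 (H + 1)).flatMap (fun r' =>
      ((PySem.List.pyRange 0 W).flatMap (fun c' =>
        [((r', c'), h_name r' c'), ((r', c' + 1), h_name r' c')])).filter
        (fun p => p.1 == (r, c)))) =
      ((PySem.List.pyRange 0 (H + 1)).flatMap (fun r' =>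
        if r' = r then
          ((PySem.List.pyRange 0 W).flatMap (fun c' =>
            (if c' = c then [((r, c), h_name r c)] else []) ++
            (if c' = c - 1 then [((r, c), h_name r (c - 1))] else [])))
        else [])) := by
    refine flatMap_congr_mem _ _ _ ?_
    intro r' hr'
    rw [List.filter_flatMap]
    by_cases hrr : r' = r
    · rw [if_pos hrr, hrr]
      refine flatMap_congr_mem _ _ _ ?_
      intro c' hc'
      rw [List.filter_cons, List.filter_cons, List.filter_nil]
      simp only [beq_coord, Prod.mk.injEq, true_and]
      by_cases h1 : c' = c <;> by_cases h2 : c' + 1 = c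
      · omega
      · simp [h1, show ¬ (c + 1 = c) by omega, show ¬ (c = c - 1) by omega]
      · simp [show c' = c - 1 by omega, show c - 1 + 1 = c by omega,
              show ¬ (c - 1 = c) by omega]
      · simp [h1, h2, show ¬ (c' = c - 1) by omega]
    · rw [if_neg hrr, List.flatMap_eq_nil_iff]
      intro c' hc'
      rw [List.filter_cons, List.filter_cons, List.filter_nil]
      simp [beq_coord, Prod.mk.injEq, hrr]
  rw [step1, flatMap_ite _ (PySem.List.pairwise_lt_pyRange_one 0 (H + 1)) r _,
      if_pos (by rw [PySem.List.mem_pyRange_one]; omega),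
      flatMap_pair _ (PySem.List.pairwise_lt_pyRange_one 0 W) (c - 1) c (by omega) _ _]
  have m1 : ((c - 1) ∈ PySem.List.pyRange 0 W) ↔ 0 < c := by
    rw [PySem.List.mem_pyRange_one]; omega
  have m2 : (c ∈ PySem.List.pyRange 0 W) ↔ c < W := by
    rw [PySem.List.mem_pyRange_one]; omega
  simp only [m1, m2]

lemma filter_vops {H W r c : Int} (hr : 0 ≤ r ∧ r ≤ H) (hc : 0 ≤ c ∧ c ≤ W) :
    (vops H W).filter (fun p => p.1 == (r, c)) =
      (if 0 < r then [((r, c), v_name (r - 1) c)] else []) ++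
      (if r < H then [((r, c), v_name r c)] else []) := by
  rw [vops, List.filter_flatMap]
  have step1 : ((PySem.List.pyRange 0 H).flatMap (fun r' =>
      ((PySem.List.pyRange 0 (W + 1)).flatMap (fun c' =>
        [((r', c'), v_name r' c'), ((r' + 1, c'), v_name r' c')])).filter
        (fun p => p.1 == (r, c)))) =
      ((PySem.List.pyRange 0 H).flatMap (fun r' =>
        (if r' = r then [((r, c), v_name r c)] else []) ++
        (if r' = r - 1 then [((r, c), v_name (r - 1) c)] else []))) := by
    refine flatMap_congr_mem _ _ _ ?_
    intro r' hr'
    rw [List.filter_flatMap]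
    have inner : ∀ c' : Int, c' ∈ PySem.List.pyRange 0 (W + 1) →
        ([((r', c'), v_name r' c'), ((r' + 1, c'), v_name r' c')].filter
          (fun p => p.1 == (r, c))) =
        (if c' = c then
          ((if r' = r then [((r, c), v_name r c)] else []) ++
           (if r' = r - 1 then [((r, c), v_name (r - 1) c)] else [])) else []) := by
      intro c' hc'
      rw [List.filter_cons, List.filter_cons, List.filter_nil]
      simp only [beq_coord, Prod.mk.injEq]
      by_cases hcc : c' = c
      · by_cases ha : r' = r <;> by_cases hb : r' + 1 = r
        · omega
        · simp [hcc, ha, show ¬ (r + 1 = r) by omega, show ¬ (r = r - 1) by omega]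
        · simp [hcc, show r' = r - 1 by omega, show r - 1 + 1 = r by omega,
                show ¬ (r - 1 = r) by omega]
        · simp [hcc, ha, hb, show ¬ (r' = r - 1) by omega]
      · simp [hcc]
    calc ((PySem.List.pyRange 0 (W + 1)).flatMap (fun c' =>
            ([((r', c'), v_name r' c'), ((r' + 1, c'), v_name r' c')].filter
              (fun p => p.1 == (r, c)))))
        = ((PySem.List.pyRange 0 (W + 1)).flatMap (fun c' =>
            if c' = c then
              ((if r' = r then [((r, c), v_name r c)] else []) ++
               (if r' = r - 1 then [((r, c), v_name (r - 1) c)] else [])) else [])) :=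
          flatMap_congr_mem _ _ _ inner
      _ = _ := by
          rw [flatMap_ite _ (PySem.List.pairwise_lt_pyRange_one 0 (W + 1)) c _,
              if_pos (by rw [PySem.List.mem_pyRange_one]; omega)]
  rw [step1, flatMap_pair _ (PySem.List.pairwise_lt_pyRange_one 0 H) (r - 1) r (by omega) _ _]
  have m1 : ((r - 1) ∈ PySem.List.pyRange 0 H) ↔ 0 < r := by
    rw [PySem.List.mem_pyRange_one]; omega
  have m2 : (r ∈ PySem.List.pyRange 0 H) ↔ r < H := by
    rw [PySem.List.mem_pyRange_one]; omega
  simp only [m1, m2]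

/- ## Dict plumbing -/

lemma getD_foldl_insert_nil (l : List (Int × Int)) (d : PySem.Dict (Int × Int) (List String))
    (k : Int × Int) (h : d.getD k ([] : List String) = []) :
    (l.foldl (fun d p => d.insert p ([] : List String)) d).getD k [] = [] := by
  induction l generalizing d with
  | nil => exact h
  | cons a l ih =>
    simp only [List.foldl_cons]
    exact ih _ (by rw [PySem.Dict.getD_insert]; split <;> simp [h])

-- ===== VERDICT (by name: the statement is the Claim_ definition above) =====
theorem build_vertices_spec : Claim_equal_build_vertices := by
  intro H W hDom
  show build_vertices H W = build_vertices_alt H W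
  rw [A_eq, B_eq]
  congr 1
  refine congrArg PySem.Dict.items ?_
  refine PySem.List.foldl_congr_mem _ _ _ _ ?_
  intro acc rc hrc
  have hb := mem_Pairs.mp hrc
  refine congrArg (acc.insert (pname rc.1 rc.2)) ?_
  rw [PySem.Dict.getD_foldl_modify_append,
      getD_foldl_insert_nil _ _ _ (PySem.Dict.getD_empty _ _),
      List.filter_append]
  have hcoord : rc = (rc.1, rc.2) := rfl
  rw [hcoord, filter_hops ⟨hb.1, hb.2.1⟩ ⟨hb.2.2.1, hb.2.2.2⟩,
      filter_vops ⟨hb.1, hb.2.1⟩ ⟨hb.2.2.1, hb.2.2.2⟩, incA]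
  simp [apply_ite (List.map (fun x : (Int × Int) × String => x.2)), List.append_assoc]
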